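-- pv_equiv track=rewrite | github.com/PeterFMF/ROM | Prog1/NATO.py | razberiNATO
-- ===== SOURCE A (Python) =====
-- def razberiNATO(niz):
--     '''Funkcija iz podanega niza odšifrira
--     NATO besedilo v navadno besedilo.'''
--     slovar = { 'a': 'alfa', 'b': 'bravo',
--                'c': 'charlie', 'd': 'delta',
--                'e': 'echo', 'f': 'foxtrot',
--                'g': 'golf', 'h': 'hotel',
--                'i': 'india', 'j': 'juliett',
--                'k': 'kilo', 'l': 'lime',
--                'm': 'mike', 'n': 'november',
--                'o': 'oscar', 'p': 'papa',
--                'q': 'quebec', 'r': 'romeo',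
--                's': 'sierra', 't': 'tango',
--                'u': 'uniform', 'v': 'victory',
--                'w': 'whiskey', 'x': 'x-ray',
--                'y': 'yankee', 'z': 'zulu'
--         }
--     novi_niz = ''
--     besedilo = niz.split()
--     for beseda in besedilo:
--         beseda = beseda.lower()
--         if beseda in slovar.values():
--             for kljuc, podatek in slovar.items():
--                 if podatek == beseda:
--                     novi_niz += kljuc
--         else:
--             novi_niz += beseda
--     return novi_niz
-- ===== SOURCE B (Python) =====
-- NATO_BESEDE = ['alfa', 'bravo', 'charlie', 'delta', 'echo', 'foxtrot',
--                'golf', 'hotel', 'india', 'juliett', 'kilo', 'lime',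
--                'mike', 'november', 'oscar', 'papa', 'quebec', 'romeo',
--                'sierra', 'tango', 'uniform', 'victory', 'whiskey',
--                'x-ray', 'yankee', 'zulu']
-- ABECEDA = 'abcdefghijklmnopqrstuvwxyz'
--
--
-- def _razberi(besede):
--     """Recursively decode a list of words: each NATO word becomes the
--     letter at the same position of ABECEDA, anything else passes through."""
--     if not besede:
--         return ''
--     b = besede[0].lower()
--     if b in NATO_BESEDE:
--         prva = ABECEDA[NATO_BESEDE.index(b)]
--     else:
--         prva = b
--     return prva + _razberi(besede[1:])
--
--
-- def razberiNATO(niz):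
--     '''Funkcija iz podanega niza odšifrira
--     NATO besedilo v navadno besedilo.'''
--     return _razberi(niz.split())
-- ===== Notes on version B (the rewrite author's own statement) =====
-- stated objective: alternative
-- what changed: B drops the dict entirely: two parallel constant tables (NATO word list and the alphabet string) plus a recursive helper that decodes word-by-word via positional index lookup and builds the result front-to-back by string concatenation, instead of A's accumulator loop with a values() membership test and an inner loop over all dict items per word.
import Mathlib
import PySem

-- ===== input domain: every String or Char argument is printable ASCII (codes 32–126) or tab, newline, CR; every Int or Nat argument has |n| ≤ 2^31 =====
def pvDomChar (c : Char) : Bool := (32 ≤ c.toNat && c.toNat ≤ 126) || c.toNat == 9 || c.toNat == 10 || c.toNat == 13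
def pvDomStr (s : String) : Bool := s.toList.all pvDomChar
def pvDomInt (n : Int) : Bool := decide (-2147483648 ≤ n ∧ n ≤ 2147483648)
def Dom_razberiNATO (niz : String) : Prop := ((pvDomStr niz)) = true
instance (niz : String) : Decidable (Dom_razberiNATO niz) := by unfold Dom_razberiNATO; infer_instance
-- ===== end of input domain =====

-- B drops A's dict: it uses two parallel constant tables (NATO word list + alphabet string)
-- and a recursive helper decoding word-by-word via positional index lookup, building the
-- result front-to-back, instead of A's accumulator loop with a values() membership test
-- and an inner loop over all dict items.  Objective: alternative (not claimed faster).
-- Strings are ported on the List Char side (PySem bridge; exact).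

-- ===== PORT A =====
-- the NATO dict literal, as an association list of (key, value) over List Char
def natoPairs : List (List Char × List Char) :=
  [("a".toList, "alfa".toList), ("b".toList, "bravo".toList),
   ("c".toList, "charlie".toList), ("d".toList, "delta".toList),
   ("e".toList, "echo".toList), ("f".toList, "foxtrot".toList),
   ("g".toList, "golf".toList), ("h".toList, "hotel".toList),
   ("i".toList, "india".toList), ("j".toList, "juliett".toList),
   ("k".toList, "kilo".toList), ("l".toList, "lime".toList),
   ("m".toList, "mike".toList), ("n".toList, "november".toList),
   ("o".toList, "oscar".toList), ("p".toList, "papa".toList),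
   ("q".toList, "quebec".toList), ("r".toList, "romeo".toList),
   ("s".toList, "sierra".toList), ("t".toList, "tango".toList),
   ("u".toList, "uniform".toList), ("v".toList, "victory".toList),
   ("w".toList, "whiskey".toList), ("x".toList, "x-ray".toList),
   ("y".toList, "yankee".toList), ("z".toList, "zulu".toList)]

-- literal port: for each word of niz.split(), lower it; if it is among slovar.values(),
-- loop over slovar.items() appending every key whose value equals it; else append the word
def razberiNATO (niz : String) : String :=
  String.ofList ((PySem.Chars.split₀ niz.toList).foldl (fun novi beseda =>
    let b := PySem.Chars.lower beseda
    if b ∈ natoPairs.map (·.2) then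
      natoPairs.foldl (fun acc p => if p.2 = b then acc ++ p.1 else acc) novi
    else novi ++ b) [])

-- ===== PORT B =====
def natoBesede : List (List Char) :=
  ["alfa".toList, "bravo".toList, "charlie".toList, "delta".toList,
   "echo".toList, "foxtrot".toList, "golf".toList, "hotel".toList,
   "india".toList, "juliett".toList, "kilo".toList, "lime".toList,
   "mike".toList, "november".toList, "oscar".toList, "papa".toList,
   "quebec".toList, "romeo".toList, "sierra".toList, "tango".toList,
   "uniform".toList, "victory".toList, "whiskey".toList, "x-ray".toList,
   "yankee".toList, "zulu".toList]

def abeceda : List Char := "abcdefghijklmnopqrstuvwxyz".toList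

-- recursive helper _razberi: decode head word by positional index, recurse on tail
def razberiRec : List (List Char) → List Char
  | [] => []
  | beseda :: rest =>
    let b := PySem.Chars.lower beseda
    let prva :=
      if b ∈ natoBesede then
        -- ABECEDA[NATO_BESEDE.index(b)]; index exists since b ∈ natoBesede
        match PySem.List.index? natoBesede b with
        | some i => ((PySem.List.pyGet? abeceda (i : Int)).map ([·])).getD []
        | none => []
      else b
    prva ++ razberiRec rest

def razberiNATO_alt (niz : String) : String :=
  String.ofList (razberiRec (PySem.Chars.split₀ niz.toList))

-- ===== PRECONDITION & SPEC =====
def Spec_razberiNATO (niz : String) (out : String) : Prop := out = razberiNATO_alt niz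
instance (niz : String) (out : String) : Decidable (Spec_razberiNATO niz out) := by unfold Spec_razberiNATO; infer_instance

-- ===== CLAIM (what is proved, stated in full; the proofs are below) =====
def Claim_equal_razberiNATO : Prop := ∀ (niz : String), Dom_razberiNATO niz → Spec_razberiNATO niz (razberiNATO niz)

-- ===== LEMMAS AND PROOFS =====

-- A's inner items-loop, with the accumulator factored out
theorem foldA_factor (b acc : List Char) :
    natoPairs.foldl (fun acc p => if p.2 = b then acc ++ p.1 else acc) acc
      = acc ++ ((natoPairs.filter (fun p => p.2 = b)).map (·.1)).flatten := by
  rw [show (fun (acc : List Char) (p : List Char × List Char) => if p.2 = b then acc ++ p.1 else acc)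
      = (fun acc p => acc ++ (if p.2 = b then p.1 else [])) from by funext acc p; split <;> simp]
  rw [PySem.List.foldl_append_eq_flatMap]
  congr 1
  induction natoPairs with
  | nil => rfl
  | cons p ps ih => by_cases h : p.2 = b <;> simp [h, ih]

-- per-word agreement: A's branch equals B's positional-index decoding of the word
theorem word_eq (b acc : List Char) :
    (if b ∈ natoPairs.map (·.2) then
      natoPairs.foldl (fun acc p => if p.2 = b then acc ++ p.1 else acc) acc
     else acc ++ b)
      = acc ++ (if b ∈ natoBesede then
          match PySem.List.index? natoBesede b with
          | some i => ((PySem.List.pyGet? abeceda (i : Int)).map ([·])).getD []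
          | none => []
        else b) := by
  by_cases hb : b ∈ natoPairs.map (·.2)
  · rw [if_pos hb, foldA_factor]
    congr 1
    simp only [natoPairs, List.map_cons, List.map_nil, List.mem_cons, List.not_mem_nil, or_false] at hb
    rcases hb with h|h|h|h|h|h|h|h|h|h|h|h|h|h|h|h|h|h|h|h|h|h|h|h|h|h <;> subst h <;> decide
  · have hvals : natoPairs.map (·.2) = natoBesede := by decide
    rw [if_neg hb, if_neg (by rw [← hvals]; exact hb)]

-- A's word loop equals B's recursion, for any accumulator
theorem loop_eq (ws : List (List Char)) (novi : List Char) :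
    (ws.foldl (fun novi beseda =>
        let b := PySem.Chars.lower beseda
        if b ∈ natoPairs.map (·.2) then
          natoPairs.foldl (fun acc p => if p.2 = b then acc ++ p.1 else acc) novi
        else novi ++ b) novi)
      = novi ++ razberiRec ws := by
  induction ws generalizing novi with
  | nil => simp [razberiRec]
  | cons w ws ih =>
      simp only [List.foldl_cons, razberiRec]
      rw [word_eq, ih, List.append_assoc]

-- ===== VERDICT (by name: the statement is the Claim_ definition above) =====
theorem razberiNATO_spec : Claim_equal_razberiNATO := by
  intro niz _
  unfold Spec_razberiNATO razberiNATO razberiNATO_alt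
  rw [loop_eq _ []]
  rfl
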